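-- pv_equiv track=rewrite | github.com/fvrrrn/hglib | utils.py | exclusions
-- ===== SOURCE A (Python) =====
-- from itertools import combinations
--
-- def count(iterable, item):
--     c = 0
--     for i in iterable:
--         if i == item:
--             c += 1
--     return c
--
-- def exclusions(iterable1, iterable2):
--     combs = set()
--     for i in range(0, len(iterable1) + 1):
--         for comb in combinations(iterable1, i):
--             if len(comb) > 0:
--                 combs.add(''.join(comb))
--     tmp = set(iterable1).difference(set(iterable2))
--     if len(tmp) == 0:
--         return combs
--     for t in tmp:
--         e1 = combs.copy()
--         for comb in combs:
--             if count(iterable1, t) != count(comb, t):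
--                 e1.remove(comb)
--                 continue
--             if t in comb:
--                 continue
--             e1.remove(comb)
--         combs = e1
--
--     return combs
-- ===== SOURCE B (Python) =====
-- from itertools import combinations
--
-- def exclusions(iterable1, iterable2):
--     # mandatory positions hold characters absent from iterable2: every valid
--     # subsequence must keep all of them, so only subsets of free positions vary.
--     allowed = set(iterable2)
--     free = [i for i, c in enumerate(iterable1) if c in allowed]
--     result = set()
--     for k in range(0, len(free) + 1):
--         for fs in combinations(free, k):
--             chosen = set(fs)
--             s = ''.join(c for i, c in enumerate(iterable1)
--                         if c not in allowed or i in chosen)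
--             if s:
--                 result.add(s)
--     return result
-- ===== Notes on version B (the rewrite author's own statement) =====
-- stated objective: alternative
-- what changed: Instead of enumerating all 2^n subsequences and then, per excluded character, rescanning the whole set with recomputed counts, B enumerates only subsets of the free positions (characters present in iterable2), always keeping the mandatory positions, so the per-character filtering passes disappear; it trades A's C-level itertools enumeration of all subsequences for a position-level enumeration of only the valid ones.
import Mathlib
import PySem

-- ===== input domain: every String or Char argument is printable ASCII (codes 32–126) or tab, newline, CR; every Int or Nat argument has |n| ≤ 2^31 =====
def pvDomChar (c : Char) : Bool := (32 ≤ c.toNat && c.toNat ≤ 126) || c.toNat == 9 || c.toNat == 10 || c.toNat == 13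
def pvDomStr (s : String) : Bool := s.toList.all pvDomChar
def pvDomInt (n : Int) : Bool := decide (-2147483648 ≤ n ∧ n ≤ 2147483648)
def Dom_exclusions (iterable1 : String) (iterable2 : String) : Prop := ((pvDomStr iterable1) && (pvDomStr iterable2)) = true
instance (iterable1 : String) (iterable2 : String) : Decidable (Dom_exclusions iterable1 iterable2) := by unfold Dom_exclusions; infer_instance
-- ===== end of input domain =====

-- B is an alternative implementation: it enumerates only subsets of the "free"
-- positions (characters occurring in iterable2), always keeping the mandatory
-- positions, instead of enumerating all 2^n subsequences and filtering them per
-- excluded character.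

-- itertools.combinations(l, k): all length-k subsequences of l, in the order itertools
-- emits them (lexicographic by position); used by both Pythons via the itertools library.
def pyCombinations {α : Type} (k : Nat) (l : List α) : List (List α) :=
  match k, l with
  | 0, _ => [[]]
  | _ + 1, [] => []
  | k + 1, c :: cs => (pyCombinations k cs).map (c :: ·) ++ pyCombinations (k + 1) cs

-- ===== PORT A =====
-- helper `count(iterable, item)` of Source A (called on strings; iterated as chars)
def pyCount (xs : List Char) (t : Char) : Int :=
  xs.foldl (fun c i => if i = t then c + 1 else c) 0

def exclusions (iterable1 : String) (iterable2 : String) : List String :=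
  let chars := iterable1.toList
  -- combs = set(); for i in range(0, len(iterable1)+1): for comb in combinations(iterable1, i): if len(comb) > 0: combs.add(''.join(comb))
  let combs : PySem.Set String :=
    (PySem.List.pyRange 0 (PySem.Str.len iterable1 + 1) 1).foldl
      (fun combs i =>
        -- i ranges over 0..len, nonnegative, so .toNat is exact
        (pyCombinations i.toNat chars).foldl
          (fun combs comb =>
            if comb.length > 0 then PySem.Set.add combs (String.ofList comb) else combs)
          combs)
      PySem.Set.empty
  let tmp : PySem.Set Char :=
    PySem.Set.diff (PySem.Set.ofList chars) (PySem.Set.ofList iterable2.toList)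
  if PySem.Set.len tmp = 0 then combs
  else
    -- for t in tmp: e1 = combs.copy(); for comb in combs: … e1.remove(comb) …; combs = e1
    -- (the final set does not depend on the iteration order over the sets;
    --  e1.remove(comb) never raises KeyError here — comb is still in e1, each distinct
    --  element being removed at most once — so Set.discard is exact for it)
    tmp.foldl
      (fun combs t =>
        combs.foldl
          (fun e1 comb =>
            if pyCount chars t ≠ pyCount comb.toList t then PySem.Set.discard e1 comb
            else if comb.toList.contains t then e1  -- `t in comb`: t is a single char, so substring test = char membership (exact)
            else PySem.Set.discard e1 comb)
          combs)
      combs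

-- ===== PORT B =====
def exclusions_alt (iterable1 : String) (iterable2 : String) : List String :=
  let chars := iterable1.toList
  let allowed : PySem.Set Char := PySem.Set.ofList iterable2.toList
  -- free = [i for i, c in enumerate(iterable1) if c in allowed]
  let free : List Int :=
    ((PySem.List.enumerate chars).filter (fun p => PySem.Set.contains allowed p.2)).map (·.1)
  (PySem.List.pyRange 0 ((free.length : Int) + 1) 1).foldl
    (fun result k =>
      -- k ranges over 0..len(free), nonnegative, so .toNat is exact
      (pyCombinations k.toNat free).foldl
        (fun result fs =>
          let chosen : PySem.Set Int := PySem.Set.ofList fs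
          -- s = ''.join(c for i, c in enumerate(iterable1) if c not in allowed or i in chosen)
          let s := String.ofList (((PySem.List.enumerate chars).filter
                      (fun p => !PySem.Set.contains allowed p.2 || PySem.Set.contains chosen p.1)).map (·.2))
          if s ≠ "" then PySem.Set.add result s else result)  -- `if s:` = s nonempty
        result)
    PySem.Set.empty

-- ===== PRECONDITION & SPEC =====
def Spec_exclusions (iterable1 : String) (iterable2 : String) (out : List String) : Prop := out = exclusions_alt iterable1 iterable2
instance (iterable1 : String) (iterable2 : String) (out : List String) : Decidable (Spec_exclusions iterable1 iterable2 out) := by unfold Spec_exclusions; infer_instance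

-- ===== CLAIM (what is proved, stated in full; the proofs are below) =====
def Claim_equal_exclusions : Prop := ∀ (iterable1 : String) (iterable2 : String), Dom_exclusions iterable1 iterable2 → Spec_exclusions iterable1 iterable2 (exclusions iterable1 iterable2)

-- ===== LEMMAS AND PROOFS =====

-- ---------- proof-only helpers ----------

-- the list A's generation loop appends (before deduplication): all combinations by size
def pvLA (chars : List Char) : List String :=
  (List.range (chars.length + 1)).flatMap
    (fun i => ((pyCombinations i chars).filter (fun c => decide (c.length > 0))).map String.ofList)

-- the boolean "keep" predicate A's removal loops implement
def pvKeep (chars s2 : List Char) (s : String) : Bool :=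
  (PySem.Set.diff (PySem.Set.ofList chars) (PySem.Set.ofList s2)).all
    (fun t => (pyCount chars t == pyCount s.toList t) && s.toList.contains t)

def pvFree (chars s2 : List Char) : List Int :=
  ((PySem.List.enumerate chars).filter
    (fun q => PySem.Set.contains (PySem.Set.ofList s2) q.2)).map (·.1)

def pvSelStr (chars s2 : List Char) (fs : List Int) : String :=
  String.ofList (((PySem.List.enumerate chars).filter
    (fun q => !PySem.Set.contains (PySem.Set.ofList s2) q.2
              || PySem.Set.contains (PySem.Set.ofList fs) q.1)).map (·.2))

-- the list B's loop appends (before deduplication)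
def pvLB (chars s2 : List Char) : List String :=
  (List.range ((pvFree chars s2).length + 1)).flatMap
    (fun k => ((pyCombinations k (pvFree chars s2)).map (pvSelStr chars s2)).filter
      (fun s => decide (s ≠ "")))

-- ---------- generic lemmas ----------

theorem nodup_subset_length {α : Type} [DecidableEq α] {l1 l2 : List α}
    (h : l1 ⊆ l2) (hn : l1.Nodup) : l1.length ≤ l2.length := by
  calc l1.length = l1.toFinset.card := by rw [List.toFinset_card_of_nodup hn]
  _ ≤ l2.toFinset.card := Finset.card_le_card (by intro x hx; simp only [List.mem_toFinset] at *; exact h hx)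
  _ ≤ l2.length := l2.toFinset_card_le

theorem mem_pyCombinations {α : Type} : ∀ (k : Nat) (l : List α) (X : List α),
    X ∈ pyCombinations k l ↔ List.Sublist X l ∧ X.length = k := by
  intro k l
  induction l generalizing k with
  | nil =>
    intro X
    match k with
    | 0 =>
      simp only [pyCombinations, List.mem_singleton]
      constructor
      · rintro rfl; simp
      · rintro ⟨h1, h2⟩; exact List.length_eq_zero_iff.mp h2
    | k + 1 =>
      simp only [pyCombinations, List.not_mem_nil, false_iff, not_and]
      intro h; have h0 := List.sublist_nil.mp h; subst h0; simp
  | cons c cs ih =>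
    intro X
    match k with
    | 0 =>
      simp only [pyCombinations, List.mem_singleton]
      constructor
      · rintro rfl; simp
      · rintro ⟨h1, h2⟩; exact List.length_eq_zero_iff.mp h2
    | k + 1 =>
      simp only [pyCombinations, List.mem_append, List.mem_map, ih]
      constructor
      · rintro (⟨Y, ⟨hY, hlen⟩, rfl⟩ | ⟨h1, h2⟩)
        · exact ⟨List.Sublist.cons₂ c hY, by simp [hlen]⟩
        · exact ⟨List.Sublist.cons c h1, h2⟩
      · rintro ⟨h1, h2⟩
        cases h1 with
        | cons _ h => exact Or.inr ⟨h, h2⟩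
        | cons₂ _ h => exact Or.inl ⟨_, ⟨h, by simpa using h2⟩, rfl⟩

theorem pyCombinations_map {α β : Type} (f : α → β) : ∀ (k : Nat) (l : List α),
    pyCombinations k (l.map f) = (pyCombinations k l).map (List.map f) := by
  intro k l
  induction l generalizing k with
  | nil => match k with
    | 0 => simp [pyCombinations]
    | k + 1 => simp [pyCombinations]
  | cons c cs ih => match k with
    | 0 => simp [pyCombinations]
    | k + 1 =>
      simp only [List.map_cons, pyCombinations, ih, List.map_append, List.map_map]
      rfl

theorem pyCombinations_split {α : Type} [BEq α] [LawfulBEq α] [DecidableEq α] (p : α → Bool) :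
    ∀ (U : List α), U.Nodup → ∀ (k : Nat),
    (pyCombinations ((U.filter p).length + k) U).filter
        (fun I => decide (∀ x ∈ U, p x = true → x ∈ I))
    = (pyCombinations k (U.filter (fun x => !p x))).map
        (fun F => U.filter (fun x => p x || decide (x ∈ F))) := by
  intro U
  induction U with
  | nil =>
    intro _ k
    match k with
    | 0 => simp [pyCombinations]
    | k + 1 => simp [pyCombinations]
  | cons u U ihU =>
    intro hN k
    have hu : u ∉ U := (List.nodup_cons.mp hN).1
    have hU : U.Nodup := (List.nodup_cons.mp hN).2
    -- rewriting the condition on a cons'd combination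
    have hcond : ∀ I : List α,
        (decide (∀ x ∈ u :: U, p x = true → x ∈ u :: I))
        = (decide (∀ x ∈ U, p x = true → x ∈ I)) := by
      intro I
      apply decide_eq_decide.mpr
      constructor
      · intro h x hx hpx
        have := h x (List.mem_cons_of_mem _ hx) hpx
        cases List.mem_cons.mp this with
        | inl he => exact absurd (he ▸ hx) hu
        | inr hi => exact hi
      · intro h x hx hpx
        cases List.mem_cons.mp hx with
        | inl he => exact he ▸ List.mem_cons_self
        | inr hi => exact List.mem_cons_of_mem _ (h x hi hpx)
    by_cases hp : p u = true
    · -- u is mandatory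
      have hfp : (u :: U).filter p = u :: U.filter p := by simp [hp]
      have hfn : (u :: U).filter (fun x => !p x) = U.filter (fun x => !p x) := by
        simp [hp]
      rw [hfp, hfn]
      have hidx : (u :: U.filter p).length + k = ((U.filter p).length + k) + 1 := by
        simp; omega
      rw [hidx]
      show (((pyCombinations ((U.filter p).length + k) U).map (u :: ·)
            ++ pyCombinations ((U.filter p).length + k + 1) U).filter _) = _
      rw [List.filter_append]
      have h2 : (pyCombinations ((U.filter p).length + k + 1) U).filter
          (fun I => decide (∀ x ∈ u :: U, p x = true → x ∈ I)) = [] := by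
        rw [List.filter_eq_nil_iff]
        intro I hI
        have hsub := (mem_pyCombinations _ _ _).mp hI
        simp only [decide_eq_true_eq, not_forall]
        refine ⟨u, List.mem_cons_self, hp, fun hmem => hu (hsub.1.subset hmem)⟩
      rw [h2, List.append_nil, List.filter_map]
      have h1 : ((pyCombinations ((U.filter p).length + k) U).filter
            ((fun I => decide (∀ x ∈ u :: U, p x = true → x ∈ I)) ∘ (u :: ·)))
          = (pyCombinations ((U.filter p).length + k) U).filter
            (fun I => decide (∀ x ∈ U, p x = true → x ∈ I)) := by
        apply List.filter_congr
        intro I _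
        exact hcond I
      rw [h1, ihU hU k, List.map_map]
      apply List.map_congr_left
      intro F _
      simp [hp]
    · -- u is free
      have hpu : p u = false := by simpa using hp
      have hfp : (u :: U).filter p = U.filter p := by simp [hpu]
      have hfn : (u :: U).filter (fun x => !p x) = u :: U.filter (fun x => !p x) := by
        simp [hpu]
      rw [hfp, hfn]
      have hFr'sub : U.filter (fun x => !p x) ⊆ U := fun x hx => (List.mem_filter.mp hx).1
      match k with
      | 0 =>
        have hrhs : (pyCombinations 0 (u :: U.filter (fun x => !p x))).map
            (fun F => (u :: U).filter (fun x => p x || decide (x ∈ F)))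
            = [U.filter p] := by
          simp [pyCombinations, List.filter_cons, hpu]
        rw [hrhs]
        have hcondF : ∀ X : List (List α), X.filter (fun I => decide (∀ x ∈ u :: U, p x = true → x ∈ I))
            = X.filter (fun I => decide (∀ x ∈ U, p x = true → x ∈ I)) := by
          intro X
          apply List.filter_congr
          intro I _
          apply decide_eq_decide.mpr
          constructor
          · intro h x hx hpx; exact h x (List.mem_cons_of_mem _ hx) hpx
          · intro h x hx hpx
            cases List.mem_cons.mp hx with
            | inl he => exact absurd (he ▸ hpx) (by simp [hpu])
            | inr hi => exact h x hi hpx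
        match hm : (U.filter p).length with
        | 0 =>
          have hM : U.filter p = [] := List.length_eq_zero_iff.mp hm
          have hnone : ∀ x ∈ U, p x = true → False := by
            intro x hx hpx
            have : x ∈ U.filter p := List.mem_filter.mpr ⟨hx, hpx⟩
            simp [hM] at this
          have hc : (decide (∀ x ∈ u :: U, p x = true → x ∈ ([] : List α))) = true := by
            apply decide_eq_true
            intro x hx hpx
            cases List.mem_cons.mp hx with
            | inl he => exact absurd (he ▸ hpx) (by simp [hpu])
            | inr hi => exact absurd hpx (fun hcc => hnone x hi hcc)
          simp only [Nat.add_zero]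
          show (pyCombinations 0 (u :: U)).filter _ = _
          simp only [pyCombinations]
          rw [List.filter_cons]
          simp only [hc, if_true, List.filter_nil, hM]
        | m + 1 =>
          simp only [Nat.add_zero]
          show (((pyCombinations m U).map (u :: ·)
                ++ pyCombinations (m + 1) U).filter _) = _
          rw [List.filter_append]
          have h1 : ((pyCombinations m U).map (u :: ·)).filter
              (fun I => decide (∀ x ∈ u :: U, p x = true → x ∈ I)) = [] := by
            rw [List.filter_map, List.map_eq_nil_iff, List.filter_eq_nil_iff]
            intro I hI
            have hsub := (mem_pyCombinations _ _ _).mp hI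
            simp only [Function.comp_apply, hcond I, decide_eq_true_eq, not_forall]
            -- if all mandatory elements were in I, then m+1 ≤ I.length = m
            by_contra hcon
            push Not at hcon
            have hMI : U.filter p ⊆ I := by
              intro x hx
              exact hcon x (List.mem_filter.mp hx).1 (List.mem_filter.mp hx).2
            have := nodup_subset_length hMI (hU.filter p)
            omega
          rw [h1, List.nil_append, hcondF]
          have hih := ihU hU 0
          rw [Nat.add_zero, hm] at hih
          rw [hih]
          simp [pyCombinations]
      | k + 1 =>
        have hidx : (U.filter p).length + (k + 1) = ((U.filter p).length + k) + 1 := by omega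
        rw [hidx]
        show (((pyCombinations ((U.filter p).length + k) U).map (u :: ·)
              ++ pyCombinations ((U.filter p).length + k + 1) U).filter _) = _
        rw [List.filter_append, List.filter_map]
        have h1 : ((pyCombinations ((U.filter p).length + k) U).filter
              ((fun I => decide (∀ x ∈ u :: U, p x = true → x ∈ I)) ∘ (u :: ·)))
            = (pyCombinations ((U.filter p).length + k) U).filter
              (fun I => decide (∀ x ∈ U, p x = true → x ∈ I)) := by
          apply List.filter_congr
          intro I _
          exact hcond I
        have h2 : (pyCombinations ((U.filter p).length + k + 1) U).filter
              (fun I => decide (∀ x ∈ u :: U, p x = true → x ∈ I))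
            = (pyCombinations ((U.filter p).length + (k + 1)) U).filter
              (fun I => decide (∀ x ∈ U, p x = true → x ∈ I)) := by
          rw [← hidx]
          apply List.filter_congr
          intro I hI
          have hsub := (mem_pyCombinations _ _ _).mp hI
          apply decide_eq_decide.mpr
          constructor
          · intro h x hx hpx; exact h x (List.mem_cons_of_mem _ hx) hpx
          · intro h x hx hpx
            cases List.mem_cons.mp hx with
            | inl he => exact absurd (he ▸ hpx) (by simp [hpu])
            | inr hi => exact h x hi hpx
        rw [h1, h2, ihU hU k, ihU hU (k + 1)]
        show _ = (pyCombinations (k + 1) (u :: U.filter (fun x => !p x))).map _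
        show _ = ((pyCombinations k (U.filter (fun x => !p x))).map (u :: ·)
              ++ pyCombinations (k + 1) (U.filter (fun x => !p x))).map _
        rw [List.map_append, List.map_map, List.map_map]
        congr 1
        · apply List.map_congr_left
          intro F hF
          have hFsub : F ⊆ U := fun x hx =>
            hFr'sub (((mem_pyCombinations _ _ _).mp hF).1.subset hx)
          simp only [Function.comp_apply, List.filter_cons, hpu, Bool.false_or,
            List.mem_cons, true_or, decide_true, if_true]
          congr 1
          apply List.filter_congr
          intro x hx
          have hne : x ≠ u := by rintro rfl; exact hu hx
          simp [hne]
        · apply List.map_congr_left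
          intro F hF
          have hFsub : F ⊆ U := fun x hx =>
            hFr'sub (((mem_pyCombinations _ _ _).mp hF).1.subset hx)
          have hcu : u ∉ F := fun hc => hu (hFsub hc)
          simp [hpu, hcu]

theorem countP_eq_iff_superset {α : Type} [DecidableEq α] (pt : α → Bool) {I U : List α}
    (hs : List.Sublist I U) (hU : U.Nodup) :
    I.countP pt = U.countP pt ↔ ∀ q ∈ U, pt q = true → q ∈ I := by
  rw [List.countP_eq_length_filter, List.countP_eq_length_filter]
  constructor
  · intro hlen q hq hptq
    have heq : I.filter pt = U.filter pt :=
      (List.Sublist.length_eq (hs.filter pt)).mp hlen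
    have : q ∈ U.filter pt := List.mem_filter.mpr ⟨hq, hptq⟩
    rw [← heq] at this
    exact (List.mem_filter.mp this).1
  · intro hsup
    have hsub : U.filter pt ⊆ I.filter pt := by
      intro q hq
      have := List.mem_filter.mp hq
      exact List.mem_filter.mpr ⟨hsup q this.1 this.2, this.2⟩
    have h1 := nodup_subset_length hsub (hU.filter pt)
    have h2 := (hs.filter pt).length_le
    omega

theorem foldl_update_eq_update_flatMap {α β : Type} [BEq α] (g : β → List α) :
    ∀ (l : List β) (s : PySem.Set α),
    l.foldl (fun s b => PySem.Set.update s (g b)) s = PySem.Set.update s (l.flatMap g) := by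
  intro l
  induction l with
  | nil => intro s; simp [PySem.Set.update]
  | cons b l ih => intro s; simp only [List.foldl_cons, List.flatMap_cons, ih,
      PySem.Set.update_append]

theorem filter_ofList {α : Type} [DecidableEq α] (q : α → Bool) :
    ∀ (l : List α), (PySem.Set.ofList l).filter q = PySem.Set.ofList (l.filter q) := by
  intro l
  induction l with
  | nil => simp [PySem.Set.ofList_nil]
  | cons x xs ih =>
    rw [PySem.Set.ofList_cons, List.filter_cons]
    by_cases hq : q x = true
    · rw [if_pos hq, List.filter_cons_of_pos hq, PySem.Set.ofList_cons, ← ih]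
      simp only [PySem.Set.discard, List.filter_filter]
      congr 1
      apply List.filter_congr
      intro y _
      cases h : y == x <;> cases hqy : q y <;> simp
    · rw [if_neg hq, List.filter_cons_of_neg hq, ← ih]
      simp only [PySem.Set.discard, List.filter_filter]
      apply List.filter_congr
      intro y _
      by_cases h : y = x
      · subst h; simp [Bool.eq_false_iff.mpr hq]
      · simp [h]

-- one removal pass of A (Set.discard is a filter, so the pass is a filter)
theorem fold_discard {α : Type} [BEq α] [LawfulBEq α] (keep : α → Bool) :
    ∀ (l : List α) (e : List α),
    l.foldl (fun e1 c => if keep c then e1 else PySem.Set.discard e1 c) e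
    = e.filter (fun y => keep y || !(l.contains y)) := by
  intro l
  induction l with
  | nil => intro e; simp
  | cons c l ih =>
    intro e
    simp only [List.foldl_cons, ih]
    by_cases hk : keep c = true
    · rw [if_pos hk]
      apply List.filter_congr
      intro y _
      cases hy : y == c
      · simp [hy]
      · have : keep y = true := by
          have : y = c := by simpa using hy
          rw [this]; exact hk
        simp [hy, this]
    · rw [if_neg hk]
      show (PySem.Set.discard e c).filter _ = _
      simp only [PySem.Set.discard, List.filter_filter]
      apply List.filter_congr
      intro y _
      cases hy : y == c
      · simp [hy]
      · have hyc : y = c := by simpa using hy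
        subst hyc
        have : keep y = false := by simpa using hk
        simp [this]

-- A's removal double loop filters combs with pvKeep
theorem fold_passes (chars : List Char) :
    ∀ (ts : List Char) (combs : List String),
    ts.foldl
      (fun combs t =>
        combs.foldl
          (fun e1 comb =>
            if pyCount chars t ≠ pyCount comb.toList t then PySem.Set.discard e1 comb
            else if comb.toList.contains t then e1
            else PySem.Set.discard e1 comb)
          combs)
      combs
    = combs.filter (fun c => ts.all
        (fun t => (pyCount chars t == pyCount c.toList t) && c.toList.contains t)) := by
  intro ts
  induction ts with
  | nil => intro combs; simp
  | cons t ts ih =>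
    intro combs
    simp only [List.foldl_cons]
    have hstep : (fun (e1 : List String) comb =>
            if pyCount chars t ≠ pyCount comb.toList t then PySem.Set.discard e1 comb
            else if comb.toList.contains t then e1
            else PySem.Set.discard e1 comb)
        = (fun e1 c => if ((pyCount chars t == pyCount c.toList t) && c.toList.contains t) = true
            then e1 else PySem.Set.discard e1 c) := by
      funext e1 c
      by_cases h1 : pyCount chars t = pyCount c.toList t
      · cases h2 : c.toList.contains t
        · simp [h1]
        · simp [h1]
      · simp [h1, beq_iff_eq]
    rw [hstep, fold_discard]
    have hpass : combs.filter (fun y =>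
          ((pyCount chars t == pyCount y.toList t) && y.toList.contains t) || !(combs.contains y))
        = combs.filter (fun y => (pyCount chars t == pyCount y.toList t) && y.toList.contains t) := by
      apply List.filter_congr
      intro y hy
      simp [List.contains_eq_mem, hy]
    rw [hpass, ih, List.filter_filter]
    apply List.filter_congr
    intro y _
    simp [List.all_cons, Bool.and_comm]

theorem pyCount_eq_count (t : Char) : ∀ (xs : List Char), pyCount xs t = (xs.count t : Int) := by
  have aux : ∀ (xs : List Char) (a : Int),
      xs.foldl (fun c i => if i = t then c + 1 else c) a = a + (xs.count t : Int) := by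
    intro xs
    induction xs with
    | nil => intro a; simp
    | cons x xs ih =>
      intro a
      simp only [List.foldl_cons, ih, List.count_cons]
      by_cases h : x = t
      · simp [h]; ring
      · have : ¬ (x == t) = true := by simpa using h
        simp [h, this]
  intro xs
  simpa using aux xs 0

-- A's generation loop builds the ordered dedup of pvLA
theorem gen_eq (chars : List Char) :
    (PySem.List.pyRange 0 ((chars.length : Int) + 1) 1).foldl
      (fun combs i =>
        (pyCombinations i.toNat chars).foldl
          (fun combs comb =>
            if comb.length > 0 then PySem.Set.add combs (String.ofList comb) else combs)
          combs)
      PySem.Set.empty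
    = PySem.Set.ofList (pvLA chars) := by
  have h1 : ((chars.length : Int) + 1) = ((chars.length + 1 : Nat) : Int) := by omega
  rw [h1, PySem.List.pyRange_zero_natCast, List.foldl_map]
  have h2 : (fun (combs : PySem.Set String) (j : Nat) =>
        (pyCombinations ((j : Int)).toNat chars).foldl
          (fun combs comb =>
            if comb.length > 0 then PySem.Set.add combs (String.ofList comb) else combs)
          combs)
      = (fun (combs : PySem.Set String) (j : Nat) =>
        PySem.Set.update combs
          (((pyCombinations j chars).filter (fun c => decide (c.length > 0))).map String.ofList)) := by
    funext s j
    rw [Int.toNat_natCast,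
      PySem.List.foldl_ite_eq_foldl_filter (fun c : List Char => c.length > 0)
        (fun s c => PySem.Set.add s (String.ofList c)),
      PySem.Set.update_map_eq_foldl_add]
  rw [h2, foldl_update_eq_update_flatMap]
  show PySem.Set.update [] _ = _
  rw [PySem.Set.update_nil_left]
  rfl

-- A's port equals: dedup the generated list, filter with pvKeep
theorem exclusions_eq_ofList (s1 s2 : String) :
    exclusions s1 s2
    = PySem.Set.ofList ((pvLA s1.toList).filter (pvKeep s1.toList s2.toList)) := by
  simp only [exclusions, PySem.Str.len_eq, gen_eq]
  by_cases h : PySem.Set.len (PySem.Set.diff (PySem.Set.ofList s1.toList) (PySem.Set.ofList s2.toList)) = 0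
  · rw [if_pos h]
    have htmp : PySem.Set.diff (PySem.Set.ofList s1.toList) (PySem.Set.ofList s2.toList) = [] := by
      have := h
      simp only [PySem.Set.len, Nat.cast_eq_zero, List.length_eq_zero_iff] at this
      exact this
    have : pvKeep s1.toList s2.toList = fun _ => true := by
      funext c
      simp [pvKeep, htmp]
    rw [this, List.filter_true]
  · rw [if_neg h, fold_passes, filter_ofList]
    rfl

-- B's double loop builds the ordered dedup of its generated list (abstract form)
theorem genB_eq (free : List Int) (sel : List Int → String) :
    (PySem.List.pyRange 0 ((free.length : Int) + 1) 1).foldl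
      (fun result k =>
        (pyCombinations k.toNat free).foldl
          (fun result fs => if sel fs ≠ "" then PySem.Set.add result (sel fs) else result)
          result)
      PySem.Set.empty
    = PySem.Set.ofList ((List.range (free.length + 1)).flatMap
        (fun k => ((pyCombinations k free).map sel).filter (fun s => decide (s ≠ "")))) := by
  have h1 : ((free.length : Int) + 1) = ((free.length + 1 : Nat) : Int) := by omega
  rw [h1, PySem.List.pyRange_zero_natCast, List.foldl_map]
  have h2 : (fun (result : PySem.Set String) (j : Nat) =>
        (pyCombinations ((j : Int)).toNat free).foldl
          (fun result fs => if sel fs ≠ "" then PySem.Set.add result (sel fs) else result)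
          result)
      = (fun (result : PySem.Set String) (j : Nat) =>
        PySem.Set.update result
          (((pyCombinations j free).map sel).filter (fun s => decide (s ≠ "")))) := by
    funext s j
    rw [Int.toNat_natCast]
    rw [show (pyCombinations j free).foldl
          (fun result fs => if sel fs ≠ "" then PySem.Set.add result (sel fs) else result) s
        = ((pyCombinations j free).map sel).foldl
          (fun (r : PySem.Set String) (str : String) => if str ≠ "" then PySem.Set.add r str else r) s
      from Eq.symm List.foldl_map]
    rw [PySem.List.foldl_ite_eq_foldl_filter (fun str : String => str ≠ "")
        (fun (s : PySem.Set String) (str : String) => PySem.Set.add s str)]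
    rfl
  rw [h2, foldl_update_eq_update_flatMap]
  show PySem.Set.update [] _ = _
  rw [PySem.Set.update_nil_left]

-- B's port equals: dedup its generated list
theorem exclusions_alt_eq_ofList (s1 s2 : String) :
    exclusions_alt s1 s2 = PySem.Set.ofList (pvLB s1.toList s2.toList) := by
  simp only [exclusions_alt]
  exact genB_eq
    (((PySem.List.enumerate s1.toList).filter
        (fun q => PySem.Set.contains (PySem.Set.ofList s2.toList) q.2)).map (·.1))
    (fun fs => String.ofList (((PySem.List.enumerate s1.toList).filter
        (fun q => !PySem.Set.contains (PySem.Set.ofList s2.toList) q.2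
                  || PySem.Set.contains (PySem.Set.ofList fs) q.1)).map (·.2)))

-- mandatory-position predicate (character not occurring in iterable2)
def pvM (s2 : List Char) (q : Int × Char) : Bool :=
  !PySem.Set.contains (PySem.Set.ofList s2) q.2

theorem enum_nodup (chars : List Char) : (PySem.List.enumerate chars 0).Nodup := by
  apply List.Pairwise.imp _ (PySem.List.pairwise_lt_enumerate chars 0)
  intro a b hab h
  rw [h] at hab
  omega

theorem fst_mem_determines (chars : List Char) {q r : Int × Char}
    (hq : q ∈ PySem.List.enumerate chars 0) (hr : r ∈ PySem.List.enumerate chars 0)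
    (h : q.1 = r.1) : q = r := by
  rw [PySem.List.mem_enumerate_iff] at hq hr
  obtain ⟨k1, hk1, rfl⟩ := hq
  obtain ⟨k2, hk2, rfl⟩ := hr
  simp only [zero_add, Nat.cast_inj] at h
  subst h
  rfl

theorem contains_ofList_eq_decide {α : Type} [BEq α] [LawfulBEq α] [DecidableEq α]
    (l : List α) (x : α) :
    PySem.Set.contains (PySem.Set.ofList l) x = decide (x ∈ l) := by
  by_cases h : x ∈ l
  · rw [(PySem.Set.contains_iff _ _).mpr ((PySem.Set.mem_ofList _ _).mpr h)]
    simp [h]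
  · have hc : ¬ PySem.Set.contains (PySem.Set.ofList l) x = true := fun hc =>
      h ((PySem.Set.mem_ofList _ _).mp ((PySem.Set.contains_iff _ _).mp hc))
    rw [Bool.eq_false_iff.mpr hc]
    simp [h]

-- A's keep predicate, evaluated at the subsequence given by an index set I, says:
-- I contains every mandatory position
theorem keep_iff (chars s2 : List Char) (I : List (Int × Char))
    (hI : List.Sublist I (PySem.List.enumerate chars 0)) :
    pvKeep chars s2 (String.ofList (I.map (·.2)))
    = decide (∀ x ∈ PySem.List.enumerate chars 0, pvM s2 x = true → x ∈ I) := by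
  have hnd := enum_nodup chars
  have hchars : (PySem.List.enumerate chars 0).map (·.2) = chars :=
    PySem.List.map_snd_enumerate chars 0
  have hcount : ∀ (t : Char), chars.count t
      = (PySem.List.enumerate chars 0).countP (fun q => q.2 == t) := by
    intro t
    conv_lhs => rw [← hchars]
    rw [List.count_eq_countP, List.countP_map]
    rfl
  have hcountI : ∀ (t : Char), (I.map (·.2)).count t = I.countP (fun q => q.2 == t) := by
    intro t
    rw [List.count_eq_countP, List.countP_map]
    rfl
  cases hdec : decide (∀ x ∈ PySem.List.enumerate chars 0, pvM s2 x = true → x ∈ I) with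
  | true =>
    have hsup := of_decide_eq_true hdec
    unfold pvKeep
    rw [List.all_eq_true]
    intro t ht
    have htt := (PySem.Set.mem_diff _ _ _).mp ht
    have ht1 : t ∈ chars := (PySem.Set.mem_ofList _ _).mp htt.1
    have ht2 : t ∉ s2 := fun hm => htt.2 ((PySem.Set.mem_ofList _ _).mpr hm)
    have hcnt : I.countP (fun q => q.2 == t)
        = (PySem.List.enumerate chars 0).countP (fun q => q.2 == t) := by
      rw [countP_eq_iff_superset _ hI hnd]
      intro q hq hqt
      apply hsup q hq
      unfold pvM
      rw [contains_ofList_eq_decide]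
      have : q.2 = t := by simpa using hqt
      simp [this, ht2]
    have hcnt' : pyCount chars t = pyCount (String.ofList (I.map (·.2))).toList t := by
      rw [pyCount_eq_count, pyCount_eq_count, String.toList_ofList, hcount, hcountI, hcnt]
    rw [Bool.and_eq_true]
    refine ⟨by simp [hcnt'], ?_⟩
    -- t occurs in chars, so some mandatory position carries t and lies in I
    rw [← hchars] at ht1
    obtain ⟨q, hq, hqt⟩ := List.mem_map.mp ht1
    have hqI : q ∈ I := by
      apply hsup q hq
      unfold pvM
      rw [contains_ofList_eq_decide]
      simp [hqt, ht2]
    rw [String.toList_ofList, List.contains_iff_mem]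
    exact List.mem_map.mpr ⟨q, hqI, hqt⟩
  | false =>
    cases hk : pvKeep chars s2 (String.ofList (I.map (·.2))) with
    | false => rfl
    | true =>
      exfalso
      have hd := of_decide_eq_false hdec
      apply hd
      intro q hq hqM
      have hts2 : q.2 ∉ s2 := by
        unfold pvM at hqM
        rw [contains_ofList_eq_decide] at hqM
        simpa using hqM
      have htc : q.2 ∈ chars := by
        rw [← hchars]
        exact List.mem_map.mpr ⟨q, hq, rfl⟩
      have ht : q.2 ∈ PySem.Set.diff (PySem.Set.ofList chars) (PySem.Set.ofList s2) := by
        rw [PySem.Set.mem_diff]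
        exact ⟨(PySem.Set.mem_ofList _ _).mpr htc,
          fun hm => hts2 ((PySem.Set.mem_ofList _ _).mp hm)⟩
      unfold pvKeep at hk
      rw [List.all_eq_true] at hk
      have hkq := hk q.2 ht
      rw [Bool.and_eq_true] at hkq
      have hcnt : I.countP (fun r => r.2 == q.2)
          = (PySem.List.enumerate chars 0).countP (fun r => r.2 == q.2) := by
        have h1 := hkq.1
        rw [beq_iff_eq, pyCount_eq_count, pyCount_eq_count, String.toList_ofList,
          hcount, hcountI] at h1
        exact_mod_cast h1.symm
      exact (countP_eq_iff_superset _ hI hnd).mp hcnt q hq (by simp)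

-- index form of one size class of A's filtered enumeration
theorem TA_idx (chars s2 : List Char) (i : Nat) :
    (((pyCombinations i chars).filter (fun c => decide (c.length > 0))).map String.ofList).filter
      (pvKeep chars s2)
    = ((pyCombinations i (PySem.List.enumerate chars 0)).filter
        (fun I => decide (0 < I.length)
          && decide (∀ x ∈ PySem.List.enumerate chars 0, pvM s2 x = true → x ∈ I))).map
        (fun I => String.ofList (I.map (·.2))) := by
  have hcomb : pyCombinations i chars
      = (pyCombinations i (PySem.List.enumerate chars 0)).map (List.map (·.2)) := by
    rw [← pyCombinations_map, PySem.List.map_snd_enumerate]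
  rw [hcomb, List.filter_map, List.filter_map, List.filter_map, List.map_map,
    List.filter_filter]
  congr 1
  apply List.filter_congr
  intro I hU
  have hIs := ((mem_pyCombinations _ _ _).mp hU).1
  simp only [Function.comp_apply]
  rw [keep_iff chars s2 I hIs, List.length_map, Bool.and_comm]

-- size classes below the number of mandatory positions are filtered away entirely
theorem TA_small (chars s2 : List Char) (i : Nat)
    (hi : i < ((PySem.List.enumerate chars 0).filter (pvM s2)).length) :
    ((pyCombinations i (PySem.List.enumerate chars 0)).filter
        (fun I => decide (0 < I.length)
          && decide (∀ x ∈ PySem.List.enumerate chars 0, pvM s2 x = true → x ∈ I))).map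
        (fun I => String.ofList (I.map (·.2))) = [] := by
  rw [List.map_eq_nil_iff, List.filter_eq_nil_iff]
  intro I hU
  have hlen := ((mem_pyCombinations _ _ _).mp hU).2
  intro hb
  rw [Bool.and_eq_true] at hb
  have hsup := of_decide_eq_true hb.2
  have hMI : (PySem.List.enumerate chars 0).filter (pvM s2) ⊆ I := by
    intro q hq
    exact hsup q (List.mem_filter.mp hq).1 (List.mem_filter.mp hq).2
  have := nodup_subset_length hMI ((enum_nodup chars).filter (pvM s2))
  omega

-- B's string for the free-position set F, as A's selected index set
theorem selstr_eq (chars s2 : List Char) (F : List (Int × Char))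
    (hF : F ⊆ PySem.List.enumerate chars 0) :
    pvSelStr chars s2 (F.map (·.1))
    = String.ofList (((PySem.List.enumerate chars 0).filter
        (fun q => pvM s2 q || decide (q ∈ F))).map (·.2)) := by
  unfold pvSelStr
  congr 1
  apply congrArg
  apply List.filter_congr
  intro q hq
  unfold pvM
  congr 1
  rw [contains_ofList_eq_decide]
  apply decide_eq_decide.mpr
  constructor
  · intro h
    obtain ⟨r, hrF, hr1⟩ := List.mem_map.mp h
    have : r = q := fst_mem_determines chars (hF hrF) hq hr1
    exact this ▸ hrF
  · intro h
    exact List.mem_map.mpr ⟨q, h, rfl⟩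

-- the main size class: A's size (m+k) class equals B's k-th class
theorem TA_term (chars s2 : List Char) (k : Nat)
    (hmk : 0 < ((PySem.List.enumerate chars 0).filter (pvM s2)).length + k) :
    ((pyCombinations (((PySem.List.enumerate chars 0).filter (pvM s2)).length + k)
        (PySem.List.enumerate chars 0)).filter
        (fun I => decide (0 < I.length)
          && decide (∀ x ∈ PySem.List.enumerate chars 0, pvM s2 x = true → x ∈ I))).map
        (fun I => String.ofList (I.map (·.2)))
    = ((pyCombinations k (pvFree chars s2)).map (pvSelStr chars s2)).filter
        (fun s => decide (s ≠ "")) := by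
  have hnd := enum_nodup chars
  have hFr : (PySem.List.enumerate chars 0).filter (fun x => !pvM s2 x)
      = (PySem.List.enumerate chars 0).filter
          (fun q => PySem.Set.contains (PySem.Set.ofList s2) q.2) := by
    apply List.filter_congr
    intro q _
    simp [pvM]
  -- drop the (always true here) nonemptiness conjunct
  have hdrop : (pyCombinations (((PySem.List.enumerate chars 0).filter (pvM s2)).length + k)
        (PySem.List.enumerate chars 0)).filter
        (fun I => decide (0 < I.length)
          && decide (∀ x ∈ PySem.List.enumerate chars 0, pvM s2 x = true → x ∈ I))
      = (pyCombinations (((PySem.List.enumerate chars 0).filter (pvM s2)).length + k)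
        (PySem.List.enumerate chars 0)).filter
        (fun I => decide (∀ x ∈ PySem.List.enumerate chars 0, pvM s2 x = true → x ∈ I)) := by
    apply List.filter_congr
    intro I hU
    have hlen := ((mem_pyCombinations _ _ _).mp hU).2
    have : decide (0 < I.length) = true := by
      apply decide_eq_true
      omega
    rw [this, Bool.true_and]
  rw [hdrop]
  have hsplit := pyCombinations_split (pvM s2) (PySem.List.enumerate chars 0) hnd k
  rw [hFr] at hsplit
  refine Eq.trans (congrArg _ hsplit) ?_
  -- right-hand side: combinations of free positions are combinations of free pairs
  have hfree : pyCombinations k (pvFree chars s2)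
      = (pyCombinations k ((PySem.List.enumerate chars 0).filter
          (fun q => PySem.Set.contains (PySem.Set.ofList s2) q.2))).map (List.map (·.1)) := by
    unfold pvFree
    rw [pyCombinations_map]
  rw [hfree, List.map_map, List.map_map]
  have hFrBsub : ∀ F ∈ pyCombinations k ((PySem.List.enumerate chars 0).filter
      (fun q => PySem.Set.contains (PySem.Set.ofList s2) q.2)), F ⊆ PySem.List.enumerate chars 0 := by
    intro F hFm x hx
    have := ((mem_pyCombinations _ _ _).mp hFm).1.subset hx
    exact (List.mem_filter.mp this).1
  have hsel : ∀ F ∈ pyCombinations k ((PySem.List.enumerate chars 0).filter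
      (fun q => PySem.Set.contains (PySem.Set.ofList s2) q.2)),
      (pvSelStr chars s2 ∘ List.map (·.1)) F
      = String.ofList (((PySem.List.enumerate chars 0).filter
          (fun q => pvM s2 q || decide (q ∈ F))).map (·.2)) := by
    intro F hFm
    exact selstr_eq chars s2 F (hFrBsub F hFm)
  rw [List.map_congr_left hsel]
  have hne : ∀ s ∈ (pyCombinations k ((PySem.List.enumerate chars 0).filter
      (fun q => PySem.Set.contains (PySem.Set.ofList s2) q.2))).map
        (fun F => String.ofList (((PySem.List.enumerate chars 0).filter
          (fun q => pvM s2 q || decide (q ∈ F))).map (·.2))),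
      decide (s ≠ "") = true := by
    intro s hs
    obtain ⟨F, hFm, rfl⟩ := List.mem_map.mp hs
    apply decide_eq_true
    have hfne : (PySem.List.enumerate chars 0).filter (fun q => pvM s2 q || decide (q ∈ F)) ≠ [] := by
      by_cases hm : ((PySem.List.enumerate chars 0).filter (pvM s2)).length = 0
      · -- then k > 0, pick an element of F
        have hk : 0 < k := by omega
        have hFlen := ((mem_pyCombinations _ _ _).mp hFm).2
        have : F ≠ [] := by
          intro hFnil
          rw [hFnil] at hFlen
          simp at hFlen
          omega
        obtain ⟨q, hqF⟩ := List.exists_mem_of_ne_nil F this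
        apply List.ne_nil_of_mem (a := q)
        refine List.mem_filter.mpr ⟨hFrBsub F hFm hqF, ?_⟩
        simp [hqF]
      · -- then some mandatory position exists
        have : (PySem.List.enumerate chars 0).filter (pvM s2) ≠ [] := by
          intro hnil
          rw [hnil] at hm
          simp at hm
        obtain ⟨q, hqM⟩ := List.exists_mem_of_ne_nil _ this
        apply List.ne_nil_of_mem (a := q)
        refine List.mem_filter.mpr ⟨(List.mem_filter.mp hqM).1, ?_⟩
        simp [(List.mem_filter.mp hqM).2]
    simp [hfne]
  rw [List.filter_eq_self.mpr hne]
  rfl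

-- the central identity: A's filtered enumeration IS B's enumeration
theorem pvLA_filter_eq_pvLB (chars s2 : List Char) :
    (pvLA chars).filter (pvKeep chars s2) = pvLB chars s2 := by
  unfold pvLA pvLB
  rw [List.filter_flatMap]
  have hFr : (PySem.List.enumerate chars 0).filter (fun x => !pvM s2 x)
      = (PySem.List.enumerate chars 0).filter
          (fun q => PySem.Set.contains (PySem.Set.ofList s2) q.2) := by
    apply List.filter_congr
    intro q _
    simp [pvM]
  have hlenfree : (pvFree chars s2).length
      = ((PySem.List.enumerate chars 0).filter
          (fun q => PySem.Set.contains (PySem.Set.ofList s2) q.2)).length := by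
    unfold pvFree
    rw [List.length_map]
  have hn : chars.length + 1
      = ((PySem.List.enumerate chars 0).filter (pvM s2)).length
        + ((pvFree chars s2).length + 1) := by
    have h1 : (PySem.List.enumerate chars 0).length
        = ((PySem.List.enumerate chars 0).filter (pvM s2)).length
          + ((PySem.List.enumerate chars 0).filter (fun x => !pvM s2 x)).length :=
      List.length_eq_length_filter_add _
    rw [PySem.List.length_enumerate, hFr] at h1
    rw [hlenfree]
    omega
  rw [hn, List.range_add, List.flatMap_append, List.flatMap_map]
  have hsmall : (List.range ((PySem.List.enumerate chars 0).filter (pvM s2)).length).flatMap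
      (fun i => (((pyCombinations i chars).filter
          (fun c => decide (c.length > 0))).map String.ofList).filter (pvKeep chars s2)) = [] := by
    rw [List.flatMap_eq_nil_iff]
    intro i hi
    rw [TA_idx]
    exact TA_small chars s2 i (List.mem_range.mp hi)
  rw [hsmall, List.nil_append]
  apply List.flatMap_congr
  intro k _
  rw [TA_idx]
  by_cases h0 : 0 < ((PySem.List.enumerate chars 0).filter (pvM s2)).length + k
  · exact TA_term chars s2 k h0
  · -- both size classes are empty: no mandatory position and the empty free subset
    have hm0 : ((PySem.List.enumerate chars 0).filter (pvM s2)).length = 0 := by omega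
    have hk0 : k = 0 := by omega
    subst hk0
    have hMnil : (PySem.List.enumerate chars 0).filter (pvM s2) = [] :=
      List.length_eq_zero_iff.mp hm0
    have hLHS : ((pyCombinations
          (((PySem.List.enumerate chars 0).filter (pvM s2)).length + 0)
          (PySem.List.enumerate chars 0)).filter
          (fun I => decide (0 < I.length)
            && decide (∀ x ∈ PySem.List.enumerate chars 0, pvM s2 x = true → x ∈ I))).map
          (fun I => String.ofList (I.map (·.2))) = [] := by
      rw [Nat.add_zero, hm0]
      show ((pyCombinations 0 (PySem.List.enumerate chars 0)).filter _).map _ = []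
      simp [pyCombinations]
    rw [hLHS]
    have hsel0 : pvSelStr chars s2 [] = "" := by
      unfold pvSelStr
      have : (PySem.List.enumerate chars 0).filter
          (fun q => !PySem.Set.contains (PySem.Set.ofList s2) q.2
            || PySem.Set.contains (PySem.Set.ofList ([] : List Int)) q.1) = [] := by
        rw [List.filter_eq_nil_iff]
        intro q hq
        have hqM : pvM s2 q = false := by
          cases h : pvM s2 q
          · rfl
          · exact absurd (List.mem_filter.mpr ⟨hq, h⟩) (by rw [hMnil]; simp)
        unfold pvM at hqM
        have hc : PySem.Set.contains (PySem.Set.ofList s2) q.2 = true := by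
          simpa using hqM
        simp [PySem.Set.ofList_nil, PySem.Set.contains]
        exact (PySem.Set.mem_ofList _ _).mp ((PySem.Set.contains_iff _ _).mp hc)
      rw [this]
      rfl
    have hz : pyCombinations 0 (pvFree chars s2) = [[]] := by
      cases hc : pvFree chars s2 <;> rfl
    rw [hz, List.map_cons, List.map_nil, hsel0]
    simp

-- ===== VERDICT (by name: the statement is the Claim_ definition above) =====
theorem exclusions_spec : Claim_equal_exclusions := by
  intro s1 s2 _
  show exclusions s1 s2 = exclusions_alt s1 s2
  rw [exclusions_eq_ofList, exclusions_alt_eq_ofList, pvLA_filter_eq_pvLB]
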